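-- pv_equiv track=rewrite | github.com/RevansChen/online-judge | Codewars/6kyu/micro-world/Python/solution1.py | micro_world
-- ===== SOURCE A (Python) =====
-- def micro_world(bacteria, k):
--     mark = set()
--     bacteriaSet = set(bacteria)
--     for i, bi in enumerate(bacteriaSet):
--         for j, bj in enumerate(bacteriaSet):
--             if (i != j) and (not bj in mark) and (bj < bi <= (bj + k)):
--                 mark.add(bj)
--     return len([*filter(lambda b: not b in mark, bacteria)])
-- ===== SOURCE B (Python) =====
-- def micro_world(bacteria, k):
--     vals = sorted(set(bacteria))
--     swallowed = {a for a, b in zip(vals, vals[1:]) if b <= a + k}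
--     return len([b for b in bacteria if b not in swallowed])
-- ===== Notes on version B (the rewrite author's own statement) =====
-- stated objective: faster
-- what changed: Replaces A's quadratic all-pairs scan over the distinct values by sorting the distinct values once and marking a value swallowed iff its immediate sorted successor is within k.
import Mathlib
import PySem

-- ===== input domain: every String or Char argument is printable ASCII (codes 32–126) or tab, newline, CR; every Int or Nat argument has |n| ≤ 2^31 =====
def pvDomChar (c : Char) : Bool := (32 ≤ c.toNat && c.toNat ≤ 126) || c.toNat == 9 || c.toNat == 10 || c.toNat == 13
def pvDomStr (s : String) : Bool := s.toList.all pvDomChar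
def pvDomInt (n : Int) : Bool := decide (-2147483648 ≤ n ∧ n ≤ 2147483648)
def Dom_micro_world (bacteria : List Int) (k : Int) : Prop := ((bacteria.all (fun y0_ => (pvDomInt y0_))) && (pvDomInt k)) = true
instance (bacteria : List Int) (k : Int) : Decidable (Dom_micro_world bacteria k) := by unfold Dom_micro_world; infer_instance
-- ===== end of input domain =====

-- B sorts the distinct values once and marks a value swallowed iff its sorted successor is ≤ value+k,
-- instead of A's all-pairs scan (objective: faster; result-order independent, so Python set iteration order is immaterial).

-- ===== PORT A =====
def micro_world (bacteria : List Int) (k : Int) : Int :=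
  let bacteriaSet : PySem.Set Int := PySem.Set.ofList bacteria
  let mark : PySem.Set Int :=
    (PySem.List.enumerate bacteriaSet).foldl (fun mark p =>
      (PySem.List.enumerate bacteriaSet).foldl (fun mark q =>
        if p.1 ≠ q.1 ∧ q.2 ∉ mark ∧ q.2 < p.2 ∧ p.2 ≤ q.2 + k then PySem.Set.add mark q.2
        else mark) mark) PySem.Set.empty
  ((bacteria.filter (fun b => decide (b ∉ mark))).length : Int)

-- ===== PORT B =====
def micro_world_alt (bacteria : List Int) (k : Int) : Int :=
  let vals : List Int := PySem.List.sorted (PySem.Set.ofList bacteria) (fun x => x)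
  let swallowed : PySem.Set Int :=
    PySem.Set.ofList (((vals.zip (vals.drop 1)).filter (fun p => decide (p.2 ≤ p.1 + k))).map (·.1))
  ((bacteria.filter (fun b => decide (b ∉ swallowed))).length : Int)

-- ===== PRECONDITION & SPEC =====
def Spec_micro_world (bacteria : List Int) (k : Int) (out : Int) : Prop := out = micro_world_alt bacteria k
instance (bacteria : List Int) (k : Int) (out : Int) : Decidable (Spec_micro_world bacteria k out) := by unfold Spec_micro_world; infer_instance

-- ===== CLAIM (what is proved, stated in full; the proofs are below) =====
def Claim_equal_micro_world : Prop := ∀ (bacteria : List Int) (k : Int), Dom_micro_world bacteria k → Spec_micro_world bacteria k (micro_world bacteria k)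

-- ===== LEMMAS AND PROOFS =====

-- membership after a fold whose step adds at most one element per item
theorem mem_foldl_step {α : Type} (P : α → Int → Prop)
    (g : PySem.Set Int → α → PySem.Set Int)
    (hg : ∀ s q x, x ∈ g s q ↔ x ∈ s ∨ P q x) :
    ∀ (l : List α) (s : PySem.Set Int) (x : Int),
      x ∈ l.foldl g s ↔ x ∈ s ∨ ∃ q ∈ l, P q x := by
  intro l
  induction l with
  | nil => simp
  | cons a t ih =>
    intro s x
    simp only [List.foldl_cons, ih, hg, List.mem_cons]
    constructor
    · rintro ((h | h) | ⟨q, hq, hP⟩)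
      · exact Or.inl h
      · exact Or.inr ⟨a, Or.inl rfl, h⟩
      · exact Or.inr ⟨q, Or.inr hq, hP⟩
    · rintro (h | ⟨q, (rfl | hq), hP⟩)
      · exact Or.inl (Or.inl h)
      · exact Or.inl (Or.inr hP)
      · exact Or.inr ⟨q, hq, hP⟩

theorem inner_step_mem (bi : Int) (i k : Int) (s : PySem.Set Int) (q : Int × Int) (x : Int) :
    x ∈ (if i ≠ q.1 ∧ q.2 ∉ s ∧ q.2 < bi ∧ bi ≤ q.2 + k then PySem.Set.add s q.2 else s)
      ↔ x ∈ s ∨ (i ≠ q.1 ∧ q.2 < bi ∧ bi ≤ q.2 + k ∧ x = q.2) := by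
  by_cases hm : q.2 ∈ s
  · simp only [hm, not_true_eq_false, false_and, and_false, if_false]
    constructor
    · exact Or.inl
    · rintro (h | ⟨_, _, _, rfl⟩) <;> [exact h; exact hm]
  · split_ifs with h
    · obtain ⟨h1, _, h3, h4⟩ := h
      simp only [PySem.Set.mem_add]
      tauto
    · constructor
      · exact Or.inl
      · rintro (hx | ⟨h1, h3, h4, rfl⟩)
        · exact hx
        · exact absurd ⟨h1, hm, h3, h4⟩ h

-- characterisation of A's mark set: x is marked iff some other element swallows it
theorem mem_mark (bacteria : List Int) (k : Int) (x : Int) :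
    x ∈ ((PySem.List.enumerate (PySem.Set.ofList bacteria)).foldl (fun mark p =>
      (PySem.List.enumerate (PySem.Set.ofList bacteria)).foldl (fun mark q =>
        if p.1 ≠ q.1 ∧ q.2 ∉ mark ∧ q.2 < p.2 ∧ p.2 ≤ q.2 + k then PySem.Set.add mark q.2
        else mark) mark) PySem.Set.empty)
      ↔ x ∈ bacteria ∧ ∃ y ∈ bacteria, x < y ∧ y ≤ x + k := by
  set l := PySem.List.enumerate (PySem.Set.ofList bacteria) with hl
  have houter : ∀ (s : PySem.Set Int) (x : Int),
      x ∈ l.foldl (fun mark p =>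
        l.foldl (fun mark q =>
          if p.1 ≠ q.1 ∧ q.2 ∉ mark ∧ q.2 < p.2 ∧ p.2 ≤ q.2 + k then PySem.Set.add mark q.2
          else mark) mark) s
        ↔ x ∈ s ∨ ∃ p ∈ l, ∃ q ∈ l, p.1 ≠ q.1 ∧ q.2 < p.2 ∧ p.2 ≤ q.2 + k ∧ x = q.2 := by
    intro s x
    exact mem_foldl_step
      (fun p x => ∃ q ∈ l, p.1 ≠ q.1 ∧ q.2 < p.2 ∧ p.2 ≤ q.2 + k ∧ x = q.2) _
      (fun s p x => mem_foldl_step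
        (fun q x => p.1 ≠ q.1 ∧ q.2 < p.2 ∧ p.2 ≤ q.2 + k ∧ x = q.2) _
        (inner_step_mem p.2 p.1 k) l s x) l s x
  rw [houter]
  simp only [PySem.Set.empty, List.not_mem_nil, false_or]
  constructor
  · rintro ⟨p, hp, q, hq, _, hlt, hle, rfl⟩
    rw [hl, PySem.List.mem_enumerate_iff] at hp hq
    obtain ⟨kp, hkp, rfl⟩ := hp
    obtain ⟨kq, hkq, rfl⟩ := hq
    refine ⟨?_, (PySem.Set.ofList bacteria)[kp], ?_, hlt, hle⟩
    · exact (PySem.Set.mem_ofList _ _).mp (List.getElem_mem hkq)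
    · exact (PySem.Set.mem_ofList _ _).mp (List.getElem_mem hkp)
  · rintro ⟨hx, y, hy, hlt, hle⟩
    have hx' : x ∈ PySem.Set.ofList bacteria := (PySem.Set.mem_ofList _ _).mpr hx
    have hy' : y ∈ PySem.Set.ofList bacteria := (PySem.Set.mem_ofList _ _).mpr hy
    obtain ⟨kx, hkx, hgx⟩ := List.mem_iff_getElem.mp hx'
    obtain ⟨ky, hky, hgy⟩ := List.mem_iff_getElem.mp hy'
    refine ⟨((0 : Int) + ky, y), ?_, ((0 : Int) + kx, x), ?_, ?_, hlt, hle, rfl⟩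
    · rw [hl, PySem.List.mem_enumerate_iff]; exact ⟨ky, hky, by rw [hgy]⟩
    · rw [hl, PySem.List.mem_enumerate_iff]; exact ⟨kx, hkx, by rw [hgx]⟩
    · simp only [ne_eq, add_right_inj, Int.natCast_inj]
      rintro rfl
      rw [hgx] at hgy
      omega

-- pairs of the zip are exactly the consecutive pairs
theorem mem_zip_succ (vals : List Int) (p : Int × Int) :
    p ∈ vals.zip (vals.drop 1) ↔
      ∃ i : Nat, ∃ h : i + 1 < vals.length, p = (vals[i], vals[i+1]) := by
  constructor
  · intro hp
    obtain ⟨i, hi, hg⟩ := List.mem_iff_getElem.mp hp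
    rw [List.length_zip, List.length_drop] at hi
    have hi1 : i + 1 < vals.length := by omega
    refine ⟨i, hi1, ?_⟩
    have h2 : (1:Nat) + i = i + 1 := Nat.add_comm 1 i
    rw [← hg, List.getElem_zip, List.getElem_drop]
    simp [h2]
  · rintro ⟨i, hi, rfl⟩
    apply List.mem_iff_getElem.mpr
    refine ⟨i, ?_, ?_⟩
    · rw [List.length_zip, List.length_drop]; omega
    · rw [List.getElem_zip, List.getElem_drop]
      congr 2
      omega

-- characterisation of B's swallowed set
theorem mem_swallowed (bacteria : List Int) (k : Int) (x : Int) :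
    (x ∈ PySem.Set.ofList ((((PySem.List.sorted (PySem.Set.ofList bacteria) (fun x => x)).zip
        ((PySem.List.sorted (PySem.Set.ofList bacteria) (fun x => x)).drop 1)).filter
        (fun p => decide (p.2 ≤ p.1 + k))).map (·.1)))
      ↔ x ∈ bacteria ∧ ∃ y ∈ bacteria, x < y ∧ y ≤ x + k := by
  set vals := PySem.List.sorted (PySem.Set.ofList bacteria) (fun x => x) with hv
  have hmemv : ∀ z : Int, z ∈ vals ↔ z ∈ bacteria := by
    intro z
    rw [hv, PySem.List.mem_sorted, PySem.Set.mem_ofList]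
  have hpw : vals.Pairwise (· < ·) := PySem.List.sorted_ofList_pairwise_lt bacteria
  have hidx : ∀ i j : Nat, ∀ hi : i < vals.length, ∀ hj : j < vals.length,
      i < j → vals[i] < vals[j] := fun i j hi hj hij =>
    (List.pairwise_iff_getElem.mp hpw) i j hi hj hij
  rw [PySem.Set.mem_ofList]
  simp only [List.mem_map, List.mem_filter, decide_eq_true_eq]
  constructor
  · rintro ⟨p, ⟨hp, hle⟩, rfl⟩
    obtain ⟨i, hi, rfl⟩ := (mem_zip_succ vals p).mp hp
    refine ⟨(hmemv _).mp (List.getElem_mem (by omega)),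
            vals[i+1], (hmemv _).mp (List.getElem_mem hi), ?_, hle⟩
    exact hidx i (i+1) (by omega) hi (by omega)
  · rintro ⟨hx, y, hy, hlt, hle⟩
    obtain ⟨i, hi, hgx⟩ := List.mem_iff_getElem.mp ((hmemv x).mpr hx)
    obtain ⟨j, hj, hgy⟩ := List.mem_iff_getElem.mp ((hmemv y).mpr hy)
    have hij : i < j := by
      by_contra hle'
      rcases Nat.lt_or_ge j i with hji | hge
      · have := hidx j i hj hi hji
        rw [hgx, hgy] at this
        omega
      · have : i = j := by omega
        subst this
        rw [hgx] at hgy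
        omega
    have hi1 : i + 1 < vals.length := by omega
    have hsucc : vals[i+1] ≤ y := by
      rcases Nat.lt_or_ge (i+1) j with hlt' | hge
      · have := hidx (i+1) j hi1 hj hlt'
        omega
      · have : i + 1 = j := by omega
        subst this
        rw [hgy]
    refine ⟨(vals[i], vals[i+1]), ⟨(mem_zip_succ vals _).mpr ⟨i, hi1, rfl⟩, ?_⟩, hgx⟩
    rw [hgx]
    omega

-- ===== VERDICT (by name: the statement is the Claim_ definition above) =====
theorem micro_world_spec : Claim_equal_micro_world := by
  intro bacteria k _
  unfold Spec_micro_world micro_world micro_world_alt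
  simp only
  congr 1
  apply congrArg
  apply List.filter_congr
  intro b _
  simp only [decide_eq_decide]
  rw [mem_mark bacteria k b, mem_swallowed bacteria k b]
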